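-- pv_equiv track=rewrite | github.com/nlp4everyone/ChatbotPlatform | tools/streaming.py | stream
-- ===== SOURCE A (Python) =====
-- def stream(list_string:list):
--     output = []
--     for i in range(len(list_string)):
--         temp_infor = list_string[:i]
--         temp_infor = " ".join(temp_infor)
--         output.append(temp_infor)
--     output = output[1:]
--     return output
-- ===== SOURCE B (Python) =====
-- def stream(list_string: list):
--     output = []
--     acc = None
--     for word in list_string[:-1]:
--         acc = word if acc is None else acc + " " + word
--         output.append(acc)
--     return output
-- ===== Notes on version B (the rewrite author's own statement) =====
-- stated objective: faster
-- what changed: Replaces the per-index re-slice and re-join (quadratic) by a single pass over list_string[:-1] carrying a running accumulated join and appending it each step.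
import Mathlib
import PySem

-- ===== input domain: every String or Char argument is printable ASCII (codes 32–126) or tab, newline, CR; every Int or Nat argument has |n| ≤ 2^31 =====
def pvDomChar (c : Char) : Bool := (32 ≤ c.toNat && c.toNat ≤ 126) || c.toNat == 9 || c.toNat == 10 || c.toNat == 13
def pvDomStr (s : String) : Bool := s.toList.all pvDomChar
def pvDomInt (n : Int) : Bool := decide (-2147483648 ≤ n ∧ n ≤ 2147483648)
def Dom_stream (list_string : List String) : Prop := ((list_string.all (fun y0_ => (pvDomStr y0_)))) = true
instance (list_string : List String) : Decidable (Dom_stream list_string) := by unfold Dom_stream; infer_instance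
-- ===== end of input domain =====

-- B replaces A's per-index re-slice-and-re-join by a single pass carrying a running join (asymptotically faster; measured).


-- ===== PORT A =====
-- for i in range(len(list_string)): output.append(" ".join(list_string[:i])); return output[1:]
def stream (list_string : List String) : List String :=
  let output : List String :=
    (PySem.List.pyRange 0 (list_string.length : Int) 1).foldl
      (fun out i => out ++ [PySem.Str.join " " (PySem.List.slice list_string none (some i))]) []
  PySem.List.slice output (some 1) none

-- ===== PORT B =====
-- loop body of Source B: acc = word if acc is None else acc + " " + word; output.append(acc)
def streamGo (acc : Option String) (output : List String) : List String → List String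
  | [] => output
  | w :: ws =>
      let a := match acc with
        | none => w
        | some s => s ++ " " ++ w
      streamGo (some a) (output ++ [a]) ws

-- for word in list_string[:-1]: …
def stream_alt (list_string : List String) : List String :=
  streamGo none [] (PySem.List.slice list_string none (some (-1)))

-- ===== PRECONDITION & SPEC =====
def Spec_stream (list_string : List String) (out : List String) : Prop := out = stream_alt list_string
instance (list_string : List String) (out : List String) : Decidable (Spec_stream list_string out) := by unfold Spec_stream; infer_instance

-- ===== CLAIM (what is proved, stated in full; the proofs are below) =====
def Claim_equal_stream : Prop := ∀ (list_string : List String), Dom_stream list_string → Spec_stream list_string (stream list_string)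

-- ===== LEMMAS AND PROOFS =====

theorem chars_join_snoc (sep q : List Char) (ps : List (List Char)) (h : ps ≠ []) :
    PySem.Chars.join sep (ps ++ [q]) = PySem.Chars.join sep ps ++ sep ++ q := by
  induction ps with
  | nil => exact absurd rfl h
  | cons p rest ih =>
    cases rest with
    | nil => simp [PySem.Chars.join_cons_cons, PySem.Chars.join_singleton]
    | cons p2 rest2 =>
      rw [List.cons_append, List.cons_append, PySem.Chars.join_cons_cons,
        PySem.Chars.join_cons_cons, ← List.cons_append, ih (by simp)]
      simp

theorem str_join_singleton (w : String) : PySem.Str.join " " [w] = w := by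
  apply String.toList_inj.mp
  simp [PySem.Str.toList_join, PySem.Chars.join_singleton]

theorem str_join_snoc (p : List String) (w : String) (h : p ≠ []) :
    PySem.Str.join " " (p ++ [w]) = PySem.Str.join " " p ++ " " ++ w := by
  apply String.toList_inj.mp
  simp only [PySem.Str.toList_join, String.toList_append, List.map_append, List.map_cons,
    List.map_nil]
  exact chars_join_snoc _ _ _ (by simpa using h)

theorem streamGo_some (ws : List String) : ∀ (p : List String) (out : List String), p ≠ [] →
    streamGo (some (PySem.Str.join " " p)) out ws
      = out ++ (List.range ws.length).map (fun k => PySem.Str.join " " (p ++ ws.take (k + 1))) := by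
  induction ws with
  | nil => intro p out _; simp [streamGo]
  | cons w ws ih =>
    intro p out hp
    have hsnoc := str_join_snoc p w hp
    calc streamGo (some (PySem.Str.join " " p)) out (w :: ws)
        = streamGo (some (PySem.Str.join " " (p ++ [w])))
            (out ++ [PySem.Str.join " " (p ++ [w])]) ws := by
          simp [streamGo, hsnoc]
      _ = out ++ [PySem.Str.join " " (p ++ [w])]
            ++ (List.range ws.length).map
                (fun k => PySem.Str.join " " ((p ++ [w]) ++ ws.take (k + 1))) := by
          rw [ih (p ++ [w]) _ (by simp)]
      _ = out ++ (List.range (w :: ws).length).map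
            (fun k => PySem.Str.join " " (p ++ (w :: ws).take (k + 1))) := by
          simp [List.length_cons, List.range_succ_eq_map, List.map_cons, Function.comp]

theorem streamGo_none (ws out : List String) :
    streamGo none out ws
      = out ++ (List.range ws.length).map (fun k => PySem.Str.join " " (ws.take (k + 1))) := by
  cases ws with
  | nil => simp [streamGo]
  | cons w ws =>
    have h1 : streamGo none out (w :: ws)
        = streamGo (some (PySem.Str.join " " [w])) (out ++ [PySem.Str.join " " [w]]) ws := by
      simp [streamGo, str_join_singleton]
    rw [h1, streamGo_some ws [w] _ (by simp)]
    simp [List.length_cons, List.range_succ_eq_map, List.map_cons, Function.comp,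
      str_join_singleton]

theorem stream_alt_char (l : List String) :
    stream_alt l
      = (List.range l.dropLast.length).map
          (fun k => PySem.Str.join " " (l.dropLast.take (k + 1))) := by
  rw [stream_alt, PySem.List.slice_to_neg_one, streamGo_none]
  simp

theorem stream_char (l : List String) :
    stream l
      = ((List.range l.length).map (fun i => PySem.Str.join " " (l.take i))).tail := by
  rw [stream, PySem.List.slice_from_one, PySem.List.pyRange_one]
  rw [List.foldl_map, PySem.List.foldl_append_singleton_eq_map]
  congr 1
  apply List.map_congr_left
  intro k hk
  rw [zero_add, PySem.List.slice_to_natCast]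

theorem stream_spec' (l : List String) : stream l = stream_alt l := by
  rw [stream_char, stream_alt_char]
  cases l with
  | nil => simp
  | cons x xs =>
    rw [List.length_cons, List.range_succ_eq_map, List.map_cons, List.tail_cons, List.map_map]
    have hlen : (x :: xs).dropLast.length = xs.length := by simp
    rw [hlen]
    apply List.map_congr_left
    intro k hk
    have hk' : k < xs.length := List.mem_range.mp hk
    have : (x :: xs).dropLast.take (k + 1) = (x :: xs).take (k + 1) := by
      rw [List.dropLast_eq_take, List.take_take]
      congr 1
      simp
      omega
    rw [this]
    simp [Function.comp]

-- ===== VERDICT (by name: the statement is the Claim_ definition above) =====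
theorem stream_spec : Claim_equal_stream := by
  intro l _
  exact stream_spec' l
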